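-- pv_equiv track=rewrite | github.com/dxdiego5/data-science-growdev-intro-programacao-python | ATIV_PRAT_07/at_04.py | create_rectangle
-- ===== SOURCE A (Python) =====
-- def create_rectangle(line, column):
--     c = ''
--     #comands = ['_','+','|']
--     for i in range(line):
--         for j in range(column):
--             if j == column or j == 0:
--                 c += '+'
--             else:
--                 c += ' - '
--         c += f'|\n'
--
--     p = 'Retangulo [horizontal]'
--     if line > column:
--         p = 'Retangulo [VERTICAL]'
--
--     # retorno de dados
--     return c + f'\n {p} \n'
-- ===== SOURCE B (Python) =====
-- def create_rectangle(line, column):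
--     p = 'Retangulo [VERTICAL]' if line > column else 'Retangulo [horizontal]'
--     if line <= 0:
--         return f'\n {p} \n'
--     row = ('+' + ' - ' * (column - 1) if column > 0 else '') + '|\n'
--     return row * line + f'\n {p} \n'
-- ===== Notes on version B (the rewrite author's own statement) =====
-- stated objective: simpler
-- what changed: Replaces A's nested per-character loops (whose j==column branch is dead) with one row string built once by string multiplication and replicated line times, plus a conditional expression for the label.
import Mathlib
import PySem

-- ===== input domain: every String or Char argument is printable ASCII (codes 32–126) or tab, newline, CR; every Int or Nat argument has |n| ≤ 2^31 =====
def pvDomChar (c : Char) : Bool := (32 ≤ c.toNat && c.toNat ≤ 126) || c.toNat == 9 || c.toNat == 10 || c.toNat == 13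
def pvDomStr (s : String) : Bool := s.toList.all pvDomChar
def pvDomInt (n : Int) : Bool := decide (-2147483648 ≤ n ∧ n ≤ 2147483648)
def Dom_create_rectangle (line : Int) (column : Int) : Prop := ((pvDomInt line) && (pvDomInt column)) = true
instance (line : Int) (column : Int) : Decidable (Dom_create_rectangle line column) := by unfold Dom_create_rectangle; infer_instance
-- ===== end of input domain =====

-- B builds the single (identical) row once and replicates it with string multiplication instead of A's nested loops; objective: simpler.

-- ===== PORT A =====
def create_rectangle (line : Int) (column : Int) : String :=
  let c := (PySem.List.pyRange 0 line 1).foldl (fun c _i =>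
    ((PySem.List.pyRange 0 column 1).foldl (fun c j =>
      if j == column || j == 0 then c ++ "+" else c ++ " - ") c) ++ "|\n") ""
  let p := if line > column then "Retangulo [VERTICAL]" else "Retangulo [horizontal]"
  c ++ ("\n " ++ p ++ " \n")

-- ===== PORT B =====
-- Python's s * n (empty for n ≤ 0) is ported as String.join (List.replicate n.toNat s).
def strMul (s : String) : Nat → String
  | 0 => ""
  | n + 1 => s ++ strMul s n

def create_rectangle_alt (line : Int) (column : Int) : String :=
  let p := if line > column then "Retangulo [VERTICAL]" else "Retangulo [horizontal]"
  if line ≤ 0 then "\n " ++ p ++ " \n"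
  else
    let row := (if column > 0 then "+" ++ strMul " - " (column - 1).toNat else "") ++ "|\n"
    strMul row line.toNat ++ ("\n " ++ p ++ " \n")

-- ===== PRECONDITION & SPEC =====
def Spec_create_rectangle (line : Int) (column : Int) (out : String) : Prop := out = create_rectangle_alt line column
instance (line : Int) (column : Int) (out : String) : Decidable (Spec_create_rectangle line column out) := by unfold Spec_create_rectangle; infer_instance

-- ===== CLAIM (what is proved, stated in full; the proofs are below) =====
def Claim_equal_create_rectangle : Prop := ∀ (line : Int) (column : Int), Dom_create_rectangle line column → Spec_create_rectangle line column (create_rectangle line column)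

-- ===== LEMMAS AND PROOFS =====

-- appending a fixed string once per list element = appending its |l|-fold replication
theorem foldl_append_const {α : Type} (s : String) :
    ∀ (l : List α) (c : String), l.foldl (fun c _ => c ++ s) c = c ++ strMul s l.length
  | [], c => by simp [strMul]
  | _ :: xs, c => by
    simp only [List.foldl, List.length_cons, strMul]
    rw [foldl_append_const s xs (c ++ s), String.append_assoc]

-- the inner loop body appends " - " for every j with 0 < j < column
theorem foldl_dash (column : Int) :
    ∀ (l : List Int), (∀ j ∈ l, 0 < j ∧ j < column) →
      ∀ c, l.foldl (fun c j => if j == column || j == 0 then c ++ "+" else c ++ " - ") c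
           = c ++ strMul " - " l.length
  | [], _ => by intro c; simp [strMul]
  | x :: xs, h => by
    intro c
    have hx := h x (List.mem_cons_self)
    have hxc : (x == column || x == 0) = false := by
      simp only [Bool.or_eq_false_iff, beq_eq_false_iff_ne]
      omega
    simp only [List.foldl, hxc, Bool.false_eq_true, if_false, List.length_cons, strMul]
    rw [foldl_dash column xs (fun j hj => h j (List.mem_cons_of_mem _ hj)) (c ++ " - "),
      String.append_assoc]

-- one row of A equals B's row
theorem row_eq (column : Int) (c : String) :
    (PySem.List.pyRange 0 column 1).foldl
        (fun c j => if j == column || j == 0 then c ++ "+" else c ++ " - ") c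
      = c ++ (if column > 0 then "+" ++ strMul " - " (column - 1).toNat else "") := by
  by_cases h : 0 < column
  · rw [PySem.List.pyRange_one_cons (by omega : (0:Int) < column)]
    have h0 : ((0:Int) == column || (0:Int) == 0) = true := by simp
    simp only [List.foldl, h0, if_true]
    rw [foldl_dash column _ (fun j hj => by
        have := (PySem.List.mem_pyRange_one).1 hj; omega) (c ++ "+")]
    rw [PySem.List.length_pyRange_one]
    simp only [h, if_true]
    rw [String.append_assoc]
    norm_num
  · rw [PySem.List.pyRange_one_eq_nil (by omega : column ≤ 0)]
    simp [h]

theorem create_rectangle_spec : Claim_equal_create_rectangle := by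
  intro line column _
  unfold Spec_create_rectangle create_rectangle create_rectangle_alt
  simp only
  by_cases hl : line ≤ 0
  · rw [if_pos hl, PySem.List.pyRange_one_eq_nil (by omega : line ≤ 0)]
    simp
  · rw [if_neg hl]
    congr 1
    calc (PySem.List.pyRange 0 line 1).foldl (fun c _i =>
            ((PySem.List.pyRange 0 column 1).foldl
              (fun c j => if j == column || j == 0 then c ++ "+" else c ++ " - ") c) ++ "|\n") ""
          = (PySem.List.pyRange 0 line 1).foldl (fun c _i =>
            c ++ ((if column > 0 then "+" ++ strMul " - " (column - 1).toNat else "") ++ "|\n")) "" := by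
            congr 1
            funext c _i
            rw [row_eq, String.append_assoc]
        _ = strMul ((if column > 0 then "+" ++ strMul " - " (column - 1).toNat else "") ++ "|\n")
              line.toNat := by
            rw [foldl_append_const]
            rw [PySem.List.length_pyRange_one]
            norm_num
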